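-- pv_equiv track=rewrite | github.com/yonggar/baekjoon | test.py | mo
-- ===== SOURCE A (Python) =====
-- def mo(m):
--     len(m)
--     a=[1,2,3,4,5]*2000
--     b=[2,1,2,3,2,4,5]*2000
--     c=[3,3,1,1,2,2,4,4,5,5]*1000
--     A=[]
--     B=[]
--     C=[]
--     for i in range(len(m)):
--         if m[i]==a[i]:
--             A.append(i)
--     for i in range(len(m)):
--         if m[i]==b[i]:
--             B.append(i)
--     for i in range(len(m)):
--         if m[i]==c[i]:
--             C.append(i)
--     M=[len(A),len(B),len(C)]
--     return max(M)
-- ===== SOURCE B (Python) =====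
-- def mo(m):
--     # Bucket the input once: tally[(i % 70, value)] = how many positions of that
--     # residue class mod 70 (= lcm of the pattern periods 5, 7, 10) hold that value.
--     tally = {}
--     for i, x in enumerate(m):
--         k = (i % 70, x)
--         tally[k] = tally.get(k, 0) + 1
--     # Each pattern's score is then 70 table lookups, no per-element comparison.
--     best = 0
--     for base in ([1, 2, 3, 4, 5], [2, 1, 2, 3, 2, 4, 5], [3, 3, 1, 1, 2, 2, 4, 4, 5, 5]):
--         hits = 0
--         for j in range(70):
--             hits += tally.get((j, base[j % len(base)]), 0)
--         if hits > best:
--             best = hits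
--     return best
-- ===== Notes on version B (the rewrite author's own statement) =====
-- stated objective: alternative
-- what changed: B builds one frequency table keyed by (index mod 70, value) in a single pass, then scores each pattern by 70 dictionary lookups, replacing A's three full comparison passes against materialised 10000/14000-element pattern lists and three index lists; Pre_ excludes lists longer than 10000, on which A raises IndexError.
import Mathlib
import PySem

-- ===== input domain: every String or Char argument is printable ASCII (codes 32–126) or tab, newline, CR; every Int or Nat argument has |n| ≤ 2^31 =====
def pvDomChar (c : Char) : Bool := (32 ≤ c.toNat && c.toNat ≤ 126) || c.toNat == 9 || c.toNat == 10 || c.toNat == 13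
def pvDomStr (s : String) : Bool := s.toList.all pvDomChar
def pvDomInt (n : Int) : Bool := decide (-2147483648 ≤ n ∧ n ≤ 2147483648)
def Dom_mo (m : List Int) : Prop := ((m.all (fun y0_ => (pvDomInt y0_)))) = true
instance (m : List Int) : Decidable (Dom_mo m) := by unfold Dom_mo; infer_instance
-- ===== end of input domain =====

-- B replaces A's three comparison passes over materialised 10000/14000-element pattern
-- lists by one frequency table keyed by (index mod 70, value) built in a single pass,
-- each pattern then scored by 70 table lookups (objective: alternative).

-- ===== PORT A =====
def mo (m : List Int) : Int :=
  let a := List.flatten (List.replicate 2000 [1, 2, 3, 4, 5])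
  let b := List.flatten (List.replicate 2000 [2, 1, 2, 3, 2, 4, 5])
  let c := List.flatten (List.replicate 1000 [3, 3, 1, 1, 2, 2, 4, 4, 5, 5])
  let A := (PySem.List.pyRange 0 m.length 1).foldl
    (fun acc i => if PySem.List.pyGetD m i 0 = PySem.List.pyGetD a i 0 then acc ++ [i] else acc) []
  let B := (PySem.List.pyRange 0 m.length 1).foldl
    (fun acc i => if PySem.List.pyGetD m i 0 = PySem.List.pyGetD b i 0 then acc ++ [i] else acc) []
  let C := (PySem.List.pyRange 0 m.length 1).foldl
    (fun acc i => if PySem.List.pyGetD m i 0 = PySem.List.pyGetD c i 0 then acc ++ [i] else acc) []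
  let M : List Int := [(A.length : Int), (B.length : Int), (C.length : Int)]
  -- max(M): M has three elements, so max? is some; .getD 0 never takes the default
  (PySem.List.max? M (fun x => x)).getD 0

-- ===== PORT B =====
def mo_alt (m : List Int) : Int :=
  let tally := (PySem.List.enumerate m 0).foldl
    (fun (d : PySem.Dict (Int × Int) Int) (p : Int × Int) =>
      d.insert (PySem.Int.mod p.1 70, p.2) (d.getD (PySem.Int.mod p.1 70, p.2) 0 + 1))
    PySem.Dict.empty
  ([[1, 2, 3, 4, 5], [2, 1, 2, 3, 2, 4, 5], [3, 3, 1, 1, 2, 2, 4, 4, 5, 5]] : List (List Int)).foldl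
    (fun (best : Int) (base : List Int) =>
      let hits := (PySem.List.pyRange 0 70 1).foldl
        (fun (h : Int) (j : Int) =>
          h + tally.getD (j, PySem.List.pyGetD base (PySem.Int.mod j (base.length : Int)) 0) 0) 0
      if best < hits then hits else best) 0

-- ===== PRECONDITION & SPEC =====
-- Pre_ excludes lists longer than 10000, on which A raises IndexError (the first pattern
-- list has only 10000 elements).
def Pre_mo (m : List Int) : Prop := m.length ≤ 10000
instance (m : List Int) : Decidable (Pre_mo m) := by unfold Pre_mo; infer_instance
def pvWitness_mo : List Int := [1, 1, 3, 4]
def Spec_mo (m : List Int) (out : Int) : Prop := out = mo_alt m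
instance (m : List Int) (out : Int) : Decidable (Spec_mo m out) := by unfold Spec_mo; infer_instance

-- ===== CLAIM (what is proved, stated in full; the proofs are below) =====
def Claim_equal_mo : Prop := ∀ (m : List Int), Dom_mo m → Pre_mo m → Spec_mo m (mo m)

-- ===== LEMMAS AND PROOFS =====

-- the common yardstick: how many indices i of m match pattern `base` repeated cyclically
def matchCount (m base : List Int) : Int :=
  ((PySem.List.pyRange 0 (m.length : Int) 1).countP
    (fun i => decide (PySem.List.pyGetD m i 0
      = PySem.List.pyGetD base (PySem.Int.mod i (base.length : Int)) 0)) : Int)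

-- ---- A side ----

-- index into a flattened replication is the modular index into the base list
lemma flat_rep_getElem? {α : Type} (L : List α) (n k : Nat) (h : k < n * L.length) :
    (List.flatten (List.replicate n L))[k]? = L[k % L.length]? := by
  induction n generalizing k with
  | zero => omega
  | succ n ih =>
    rw [List.replicate_succ, List.flatten_cons]
    by_cases hk : k < L.length
    · rw [List.getElem?_append_left hk, Nat.mod_eq_of_lt hk]
    · rw [not_lt] at hk
      rw [List.getElem?_append_right hk, ih (k - L.length) (by rw [Nat.succ_mul] at h; omega),
        Nat.mod_eq_sub_mod hk]

lemma periodic_get (L : List Int) (n : Nat) (hL : 0 < L.length) (j : Int)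
    (h0 : 0 ≤ j) (hj : j < (n : Int) * L.length) :
    PySem.List.pyGetD (List.flatten (List.replicate n L)) j 0
      = PySem.List.pyGetD L (PySem.Int.mod j L.length) 0 := by
  obtain ⟨k, rfl⟩ := Int.eq_ofNat_of_zero_le h0
  have hm := PySem.Int.mod_eq_emod_of_pos (a := (k:Int)) (b := (L.length:Int)) (by exact_mod_cast hL)
  rw [hm]
  have : ((k : Int) % (L.length : Int)) = ((k % L.length : Nat) : Int) := by
    exact_mod_cast (Int.natCast_mod k L.length).symm
  rw [this, PySem.List.pyGetD_natCast, PySem.List.pyGetD_natCast,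
    List.getD_eq_getElem?_getD, List.getD_eq_getElem?_getD,
    flat_rep_getElem? L n k (by exact_mod_cast hj)]

-- A's comparison against the long periodic list counts the same as matchCount
lemma a_count_eq (m L : List Int) (n : Nat) (hL : 0 < L.length)
    (hm : (m.length : Int) ≤ (n : Int) * L.length) :
    (((PySem.List.pyRange 0 (m.length : Int) 1).filter
      (fun i => decide (PySem.List.pyGetD m i 0
        = PySem.List.pyGetD (List.flatten (List.replicate n L)) i 0))).length : Int)
    = matchCount m L := by
  unfold matchCount
  rw [← List.countP_eq_length_filter]
  congr 1
  apply List.countP_congr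
  intro i hi
  rw [PySem.List.mem_pyRange_one] at hi
  rw [periodic_get L n hL i hi.1 (by omega)]

-- ---- B side ----

-- a nodup index list sums an indicator to the value at the one matching index
lemma sum_indicator (R : List Int) (hR : R.Nodup) (j₀ : Int) (hj : j₀ ∈ R) (c : Int → Int) :
    (R.map (fun j => if j₀ = j then c j else 0)).sum = c j₀ := by
  induction R with
  | nil => cases hj
  | cons r t ih =>
    rcases List.mem_cons.mp hj with h | h
    · subst h
      have hz : (t.map (fun j => if j₀ = j then c j else 0)).sum = 0 := by
        apply List.sum_eq_zero
        intro x hx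
        obtain ⟨j, hjt, rfl⟩ := List.mem_map.mp hx
        have : j₀ ≠ j := fun e => (List.nodup_cons.mp hR).1 (e ▸ hjt)
        simp [this]
      simp [hz]
    · have hne : j₀ ≠ r := fun e => (List.nodup_cons.mp hR).1 (e ▸ h)
      simp [hne, ih (List.nodup_cons.mp hR).2 h]

-- summing fibre counts over all residues recovers the total count
lemma sum_fiber {α : Type} (R : List Int) (hR : R.Nodup) (l : List α)
    (r : α → Int) (hr : ∀ x ∈ l, r x ∈ R) (q : Int → α → Bool) :
    (R.map (fun j => (l.countP (fun x => (r x == j) && q j x) : Int))).sum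
      = (l.countP (fun x => q (r x) x) : Int) := by
  induction l with
  | nil => simp
  | cons x t ih =>
    have hx : r x ∈ R := hr x (List.mem_cons_self ..)
    have ht : ∀ y ∈ t, r y ∈ R := fun y hy => hr y (List.mem_cons_of_mem _ hy)
    have split : ∀ j : Int,
        ((x :: t).countP (fun y => (r y == j) && q j y) : Int)
          = (t.countP (fun y => (r y == j) && q j y) : Int)
            + (if r x = j then (if q j x then 1 else 0) else 0) := by
      intro j
      rw [List.countP_cons]
      by_cases h1 : r x = j <;> by_cases h2 : q j x = true <;> simp [h1, h2]
    calc (R.map (fun j => ((x :: t).countP (fun y => (r y == j) && q j y) : Int))).sum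
        = (R.map (fun j => (t.countP (fun y => (r y == j) && q j y) : Int)
            + (if r x = j then (if q j x then 1 else 0) else 0))).sum := by
          exact congrArg List.sum (List.map_congr_left (fun j _ => split j))
      _ = (R.map (fun j => (t.countP (fun y => (r y == j) && q j y) : Int))).sum
            + (R.map (fun j => if r x = j then (if q j x then 1 else 0) else 0)).sum := by
          rw [← List.sum_map_add]
      _ = (t.countP (fun y => q (r y) y) : Int) + (if q (r x) x then 1 else 0) := by
          rw [ih ht, sum_indicator R hR (r x) hx]
      _ = ((x :: t).countP (fun y => q (r y) y) : Int) := by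
          rw [List.countP_cons]
          by_cases h2 : q (r x) x = true <;> simp [h2]

-- B's 70 table lookups for one base pattern sum to matchCount
lemma b_hits_eq (m base : List Int) (hb : 0 < base.length) (hdvd : (base.length : Int) ∣ 70) :
    (PySem.List.pyRange 0 70 1).foldl
      (fun (h : Int) (j : Int) =>
        h + (((PySem.List.enumerate m 0).foldl
          (fun (d : PySem.Dict (Int × Int) Int) (p : Int × Int) =>
            d.insert (PySem.Int.mod p.1 70, p.2) (d.getD (PySem.Int.mod p.1 70, p.2) 0 + 1))
          PySem.Dict.empty).getD
            (j, PySem.List.pyGetD base (PySem.Int.mod j (base.length : Int)) 0) 0)) 0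
    = matchCount m base := by
  -- the tally fold is a counting fold over the residue-keyed pairs
  have htally : ∀ v : Int × Int,
      ((PySem.List.enumerate m 0).foldl
        (fun (d : PySem.Dict (Int × Int) Int) (p : Int × Int) =>
          d.insert (PySem.Int.mod p.1 70, p.2) (d.getD (PySem.Int.mod p.1 70, p.2) 0 + 1))
        PySem.Dict.empty).getD v 0
      = (((PySem.List.enumerate m 0).map (fun p => (PySem.Int.mod p.1 70, p.2))).count v : Int) := by
    intro v
    rw [← List.foldl_map (f := fun p : Int × Int => (PySem.Int.mod p.1 70, p.2))
        (g := fun (d : PySem.Dict (Int × Int) Int) (k : Int × Int) => d.insert k (d.getD k 0 + 1)),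
      PySem.Dict.getD_foldl_insert_add_one]
    simp [PySem.Dict.getD, PySem.Dict.get?, PySem.Dict.empty]
  rw [PySem.List.foldl_add (g := fun j =>
    ((PySem.List.enumerate m 0).foldl
      (fun (d : PySem.Dict (Int × Int) Int) (p : Int × Int) =>
        d.insert (PySem.Int.mod p.1 70, p.2) (d.getD (PySem.Int.mod p.1 70, p.2) 0 + 1))
      PySem.Dict.empty).getD
        (j, PySem.List.pyGetD base (PySem.Int.mod j (base.length : Int)) 0) 0)]
  rw [zero_add]
  have hmap : ∀ j : Int,
      ((PySem.List.enumerate m 0).map (fun p => (PySem.Int.mod p.1 70, p.2))).count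
          (j, PySem.List.pyGetD base (PySem.Int.mod j (base.length : Int)) 0)
      = (PySem.List.pyRange 0 (m.length : Int) 1).countP
          (fun i => (PySem.Int.mod i 70 == j)
            && (PySem.List.pyGetD m i 0
              == PySem.List.pyGetD base (PySem.Int.mod j (base.length : Int)) 0)) := by
    intro j
    rw [List.count_eq_countP, List.countP_map,
      PySem.List.enumerate_eq_map_pyRange (d := 0), List.countP_map]
    apply List.countP_congr
    intro i _
    simp [Function.comp, Prod.ext_iff]
  calc ((PySem.List.pyRange 0 70 1).map (fun j =>
        (((PySem.List.enumerate m 0).foldl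
          (fun (d : PySem.Dict (Int × Int) Int) (p : Int × Int) =>
            d.insert (PySem.Int.mod p.1 70, p.2) (d.getD (PySem.Int.mod p.1 70, p.2) 0 + 1))
          PySem.Dict.empty).getD
            (j, PySem.List.pyGetD base (PySem.Int.mod j (base.length : Int)) 0) 0))).sum
      = ((PySem.List.pyRange 0 70 1).map (fun j =>
          ((PySem.List.pyRange 0 (m.length : Int) 1).countP
            (fun i => (PySem.Int.mod i 70 == j)
              && (PySem.List.pyGetD m i 0
                == PySem.List.pyGetD base (PySem.Int.mod j (base.length : Int)) 0)) : Int))).sum := by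
        exact congrArg List.sum (List.map_congr_left (fun j _ => by rw [htally, hmap]))
    _ = ((PySem.List.pyRange 0 (m.length : Int) 1).countP
          (fun i => PySem.List.pyGetD m i 0
            == PySem.List.pyGetD base
              (PySem.Int.mod (PySem.Int.mod i 70) (base.length : Int)) 0) : Int) := by
        apply sum_fiber (PySem.List.pyRange 0 70 1) (PySem.List.nodup_pyRange_one 0 70)
          (PySem.List.pyRange 0 (m.length : Int) 1) (fun i => PySem.Int.mod i 70)
          (fun i _ => by
            rw [PySem.List.mem_pyRange_one]
            exact ⟨PySem.Int.mod_nonneg i (by norm_num), PySem.Int.mod_lt i (by norm_num)⟩)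
          (fun j i => PySem.List.pyGetD m i 0
            == PySem.List.pyGetD base (PySem.Int.mod j (base.length : Int)) 0)
    _ = matchCount m base := by
        unfold matchCount
        congr 1
        apply List.countP_congr
        intro i hi
        rw [PySem.List.mem_pyRange_one] at hi
        have hb' : (0 : Int) < (base.length : Int) := by exact_mod_cast hb
        have e1 := PySem.Int.mod_eq_emod_of_pos (a := i) (b := 70) (by norm_num)
        have e2 := PySem.Int.mod_eq_emod_of_pos (a := PySem.Int.mod i 70) (b := (base.length : Int)) hb'
        have e3 := PySem.Int.mod_eq_emod_of_pos (a := i) (b := (base.length : Int)) hb'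
        rw [e2, e1, e3, Int.emod_emod_of_dvd i hdvd]
        simp

-- ===== VERDICT (by name: the statement is the Claim_ definition above) =====
theorem mo_spec : Claim_equal_mo := by
  intro m _ hP
  unfold Pre_mo at hP
  unfold Spec_mo mo mo_alt
  simp only [PySem.List.foldl_append_ite_eq_filter, List.nil_append]
  have ha := a_count_eq m [1,2,3,4,5] 2000 (by decide) (by simp; omega)
  have hb := a_count_eq m [2,1,2,3,2,4,5] 2000 (by decide) (by simp; omega)
  have hc := a_count_eq m [3,3,1,1,2,2,4,4,5,5] 1000 (by decide) (by simp; omega)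
  simp only [PySem.List.max?_id_cons, Option.getD_some]
  simp only [List.foldl_cons, List.foldl_nil]
  rw [b_hits_eq m [1,2,3,4,5] (by decide) (by decide),
    b_hits_eq m [2,1,2,3,2,4,5] (by decide) (by decide),
    b_hits_eq m [3,3,1,1,2,2,4,4,5,5] (by decide) (by decide)]
  rw [← ha, ← hb, ← hc]
  split_ifs <;> omega
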